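-- pv_equiv track=rewrite | github.com/BrandonJRobinson/modular-forms-ml | core.py | sigma_k
-- ===== SOURCE A (Python) =====
-- def sigma_k(n, k):
--     """Sum of k-th powers of divisors of n."""
--     if n <= 0: return 0
--     # Create divisors
--     divs = []
--     for i in range(1, int(n**0.5) + 1):
--         if n % i == 0:
--             divs.append(i)
--             if i*i != n:
--                 divs.append(n // i)
--     return sum(d**k for d in divs)
-- ===== SOURCE B (Python) =====
-- def sigma_k(n, k):
--     """Sum of k-th powers of divisors of n."""
--     if n <= 0:
--         return 0
--     total = 1
--     m = n
--     p = 2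
--     while p * p <= m:
--         if m % p == 0:
--             e = 0
--             while m % p == 0:
--                 m //= p
--                 e += 1
--             total *= sum(p ** (j * k) for j in range(e + 1))
--         p += 1
--     if m > 1:
--         total *= 1 + m ** k
--     return total
-- ===== Notes on version B (the rewrite author's own statement) =====
-- stated objective: alternative
-- what changed: Replaces A's sqrt-bounded divisor-pair collection (append i and n//i for each i up to int(n**0.5), then sum powers) by trial-division prime factorization of n, multiplying one geometric sum of k-th prime powers per prime factor; it trades the explicit divisor list for the multiplicative formula for the divisor-power sum.
-- outside the precondition, e.g. on sigma_k(74, -1): A returns 1.5405405405405406, B returns 1.5405405405405403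
import Mathlib
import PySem

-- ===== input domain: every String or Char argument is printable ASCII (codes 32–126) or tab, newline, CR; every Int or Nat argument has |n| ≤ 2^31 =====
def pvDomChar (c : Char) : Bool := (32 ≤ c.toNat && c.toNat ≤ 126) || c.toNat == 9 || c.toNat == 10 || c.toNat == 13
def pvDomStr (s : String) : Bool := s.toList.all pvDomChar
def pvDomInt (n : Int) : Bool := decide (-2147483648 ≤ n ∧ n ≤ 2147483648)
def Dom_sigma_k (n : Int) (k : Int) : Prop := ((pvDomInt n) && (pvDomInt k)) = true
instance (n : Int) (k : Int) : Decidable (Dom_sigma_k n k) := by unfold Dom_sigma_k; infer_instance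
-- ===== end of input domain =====

-- B replaces A's sqrt-bounded divisor-pair collection by trial-division factorization multiplying per-prime geometric sums of k-th powers (alternative algorithm).


-- ===== PORT A =====
-- int(n**0.5) is ported as Int.sqrt n: exact for 0 < n ≤ 2^31 (n is represented exactly as a
-- double there and the correctly-rounded double sqrt floors to the integer square root).
-- d**k is ported as d ^ k.toNat; Pre_ restricts to the inputs where the Python result is an int.
def sigma_k (n : Int) (k : Int) : Int :=
  if n ≤ 0 then 0
  else
    let divs : List Int :=
      (PySem.List.pyRange 1 (Int.sqrt n + 1) 1).foldl
        (fun acc i =>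
          if PySem.Int.mod n i == 0 then
            let acc1 := acc ++ [i]
            if i * i ≠ n then acc1 ++ [PySem.Int.floordiv n i] else acc1
          else acc) []
    (divs.map (fun d => d ^ k.toNat)).sum

-- ===== PORT B =====
-- B factorizes n by trial division and multiplies per-prime geometric sums of k-th powers.
-- 'm //= p' / 'm % p' are PySem.Int.floordiv / mod; 'p ** (j*k)' and 'm ** k' use (...).toNat
-- exponents; Pre_ restricts to the inputs where the Python result is an int.
-- The Nat fuel arguments are totality devices only: the fuel passed below provably exceeds the
-- number of loop iterations, so the fuel-0 fallback (= the loop-exit value) is never reached.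

-- inner 'while m % p == 0' loop: returns the final (m, e)
def pvDivOutF : Nat → Int → Int → Int → Int × Int
  | 0, m, _, e => (m, e)
  | f + 1, m, p, e =>
    if PySem.Int.mod m p = 0 then pvDivOutF f (PySem.Int.floordiv m p) p (e + 1)
    else (m, e)

-- outer 'while p * p <= m' loop, followed by the final 'if m > 1' adjustment
def pvSigmaLoopF (k : Int) : Nat → Int → Int → Int → Int
  | 0, m, _, total => if 1 < m then total * (1 + m ^ k.toNat) else total
  | f + 1, m, p, total =>
    if p * p ≤ m then
      if PySem.Int.mod m p = 0 then
        pvSigmaLoopF k f (pvDivOutF m.toNat m p 0).1 (p + 1)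
          (total * ((PySem.List.pyRange 0 ((pvDivOutF m.toNat m p 0).2 + 1) 1).map
            (fun j => p ^ (j * k).toNat)).sum)
      else pvSigmaLoopF k f m (p + 1) total
    else if 1 < m then total * (1 + m ^ k.toNat) else total

def sigma_k_alt (n : Int) (k : Int) : Int :=
  if n ≤ 0 then 0 else pvSigmaLoopF k (n.toNat + 1) n 2 1

-- ===== PRECONDITION & SPEC =====
-- Pre_ excludes n > 0 with k < 0, where both Pythons return a float (d**k with negative k),
-- not a value of the declared int type.
def Pre_sigma_k (n : Int) (k : Int) : Prop := n ≤ 0 ∨ 0 ≤ k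
instance (n : Int) (k : Int) : Decidable (Pre_sigma_k n k) := by unfold Pre_sigma_k; infer_instance
def pvWitness_sigma_k : Int × Int := (12, 2)

def Spec_sigma_k (n : Int) (k : Int) (out : Int) : Prop := out = sigma_k_alt n k
instance (n : Int) (k : Int) (out : Int) : Decidable (Spec_sigma_k n k out) := by unfold Spec_sigma_k; infer_instance

-- ===== CLAIM (what is proved, stated in full; the proofs are below) =====
def Claim_equal_sigma_k : Prop := ∀ (n : Int) (k : Int), Dom_sigma_k n k → Pre_sigma_k n k → Spec_sigma_k n k (sigma_k n k)

-- ===== LEMMAS AND PROOFS =====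

-- the per-iteration contribution of A's loop
def pvG (n : Int) (i : Int) : List Int :=
  if PySem.Int.mod n i == 0 then
    i :: (if i * i ≠ n then [PySem.Int.floordiv n i] else [])
  else []

theorem pvSqrt_sq_le {n : Int} (h : 0 ≤ n) : Int.sqrt n * Int.sqrt n ≤ n := by
  unfold Int.sqrt
  have h1 : Nat.sqrt n.toNat * Nat.sqrt n.toNat ≤ n.toNat := by
    simpa [pow_two] using Nat.sqrt_le' n.toNat
  have h2 : ((Nat.sqrt n.toNat * Nat.sqrt n.toNat : Nat) : Int) ≤ ((n.toNat : Nat) : Int) := by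
    exact_mod_cast h1
  push_cast at h2
  rwa [Int.toNat_of_nonneg h] at h2

theorem pvLt_sqrt_succ {n : Int} (h : 0 ≤ n) : n < (Int.sqrt n + 1) * (Int.sqrt n + 1) := by
  unfold Int.sqrt
  have h1 : n.toNat < (Nat.sqrt n.toNat + 1) * (Nat.sqrt n.toNat + 1) := by
    have := Nat.lt_succ_sqrt' n.toNat
    simpa [Nat.succ_eq_add_one, pow_two] using this
  have h2 : ((n.toNat : Nat) : Int) < (((Nat.sqrt n.toNat + 1) * (Nat.sqrt n.toNat + 1) : Nat) : Int) := by
    exact_mod_cast h1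
  push_cast at h2
  rwa [Int.toNat_of_nonneg h] at h2

theorem pvSqrt_bounds {n : Int} (h : 1 ≤ n) :
    1 ≤ Int.sqrt n ∧ Int.sqrt n * Int.sqrt n ≤ n ∧ n < (Int.sqrt n + 1) * (Int.sqrt n + 1) := by
  have h0 : (0:Int) ≤ n := by omega
  have hle := pvSqrt_sq_le h0
  have hlt := pvLt_sqrt_succ h0
  have hnn := Int.sqrt_nonneg n
  refine ⟨?_, hle, hlt⟩
  nlinarith

theorem pvSqrt_le_self {n : Int} (h : 1 ≤ n) : Int.sqrt n ≤ n := by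
  obtain ⟨h1, h2, _⟩ := pvSqrt_bounds h
  nlinarith

-- membership in one loop-iteration contribution
theorem pvMem_g {n i : Int} (hi : 0 < i) (a : Int) :
    a ∈ pvG n i ↔ i ∣ n ∧ (a = i ∨ (i * i ≠ n ∧ a = n / i)) := by
  unfold pvG
  by_cases hd : i ∣ n
  · have hm : PySem.Int.mod n i = 0 := (PySem.Int.mod_eq_zero_iff_dvd n i).2 hd
    rw [PySem.Int.floordiv_eq_ediv_of_pos hi]
    by_cases hsq : i * i ≠ n <;> simp [hm, hsq, hd]
  · have hm : ¬ PySem.Int.mod n i = 0 := fun hc => hd ((PySem.Int.mod_eq_zero_iff_dvd n i).1 hc)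
    simp [hm, hd]

-- cofactor facts for a positive divisor of a positive n
theorem pvCofactor {n i : Int} (h1 : 1 ≤ n) (hd : i ∣ n) (hi : 1 ≤ i) :
    i * (n / i) = n ∧ 1 ≤ n / i ∧ n / i ≤ n ∧ (n / i) ∣ n := by
  have hic : i * (n / i) = n := Int.mul_ediv_cancel' hd
  have hc1 : 1 ≤ n / i := by
    by_contra hc
    push_neg at hc
    have : i * (n / i) ≤ 0 := mul_nonpos_of_nonneg_of_nonpos (by omega) (by omega)
    omega
  refine ⟨hic, hc1, by nlinarith, dvd_of_mul_left_eq i hic⟩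

theorem pvSmall_divisor_le_sqrt {n d : Int} (h1 : 1 ≤ n) (hd1 : 1 ≤ d) (hdd : d * d ≤ n) :
    d ≤ Int.sqrt n := by
  obtain ⟨hr1, hr2, hr3⟩ := pvSqrt_bounds h1
  by_contra hc
  push_neg at hc
  nlinarith

-- the paired divisor n / i is strictly beyond the square root
theorem pvCofactor_gt {n i : Int} (h1 : 1 ≤ n) (hd : i ∣ n) (hi1 : 1 ≤ i)
    (hir : i ≤ Int.sqrt n) (hsq : i * i ≠ n) : Int.sqrt n < n / i := by
  obtain ⟨hr1, hr2, hr3⟩ := pvSqrt_bounds h1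
  obtain ⟨hic, hc1, hcn, hcd⟩ := pvCofactor h1 hd hi1
  by_contra hc
  push_neg at hc
  have hcc : 0 ≤ n / i := by omega
  have h5 : i * (n / i) ≤ Int.sqrt n * (n / i) := mul_le_mul_of_nonneg_right hir hcc
  have h6 : Int.sqrt n * (n / i) ≤ Int.sqrt n * Int.sqrt n :=
    mul_le_mul_of_nonneg_left hc (by omega)
  have hnrr : n = Int.sqrt n * Int.sqrt n := le_antisymm (by omega) hr2
  have hceq : n / i = Int.sqrt n := by nlinarith
  have hieq2 : i * Int.sqrt n = Int.sqrt n * Int.sqrt n := by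
    linear_combination hic + hnrr - i * hceq
  have hieq : i = Int.sqrt n := mul_right_cancel₀ (by omega : Int.sqrt n ≠ 0) hieq2
  have h7 : i = n / i := by omega
  apply hsq
  linear_combination i * h7 + hic

theorem pvMem_flatMap_g {n : Int} (h : 1 ≤ n) (a : Int) :
    a ∈ (PySem.List.pyRange 1 (Int.sqrt n + 1) 1).flatMap (pvG n) ↔
      1 ≤ a ∧ a ≤ n ∧ a ∣ n := by
  obtain ⟨hr1, hr2, hr3⟩ := pvSqrt_bounds h
  simp only [List.mem_flatMap, PySem.List.mem_pyRange_one]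
  constructor
  · rintro ⟨i, ⟨hi1, hi2⟩, hmem⟩
    obtain ⟨hd, hcase⟩ := (pvMem_g (by omega) a).1 hmem
    rcases hcase with rfl | ⟨hsq, rfl⟩
    · exact ⟨hi1, le_trans (by omega) (pvSqrt_le_self h), hd⟩
    · obtain ⟨hic, hc1, hcn, hcd⟩ := pvCofactor h hd hi1
      exact ⟨hc1, hcn, hcd⟩
  · rintro ⟨ha1, ha2, ha3⟩
    by_cases har : a ≤ Int.sqrt n
    · exact ⟨a, ⟨ha1, by omega⟩, (pvMem_g (by omega) a).2 ⟨ha3, Or.inl rfl⟩⟩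
    · push_neg at har
      obtain ⟨hic, hc1, hcn, hcd⟩ := pvCofactor h ha3 ha1
      set c := n / a with hcdef
      have haa : n < a * a := by
        have t1 : (Int.sqrt n + 1) * (Int.sqrt n + 1) ≤ a * (Int.sqrt n + 1) :=
          mul_le_mul_of_nonneg_right (by omega) (by omega)
        have t2 : a * (Int.sqrt n + 1) ≤ a * a := mul_le_mul_of_nonneg_left (by omega) (by omega)
        omega
      have hia : c < a := by
        by_contra hcon
        push_neg at hcon
        have t3 : a * a ≤ a * c := mul_le_mul_of_nonneg_left hcon (by omega)
        omega
      have hii : c * c ≤ n := by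
        have t4 : c * c ≤ c * a := mul_le_mul_of_nonneg_left (by omega) (by omega)
        have t5 : c * a = a * c := mul_comm c a
        omega
      have hir : c ≤ Int.sqrt n := pvSmall_divisor_le_sqrt h hc1 hii
      have h9 : c * a = n := by rw [mul_comm]; exact hic
      have hna : n / c = a := by
        rw [← h9]
        exact Int.mul_ediv_cancel_left a (by omega)
      have hsq : c * c ≠ n := by
        intro hcontra
        have h8 : c * a = c * c := h9.trans hcontra.symm
        have : a = c := mul_left_cancel₀ (by omega) h8
        omega
      exact ⟨c, ⟨hc1, by omega⟩, (pvMem_g (by omega) a).2 ⟨hcd, Or.inr ⟨hsq, hna.symm⟩⟩⟩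

theorem pvNodup_flatMap_g {n : Int} (h : 1 ≤ n) :
    ((PySem.List.pyRange 1 (Int.sqrt n + 1) 1).flatMap (pvG n)).Nodup := by
  obtain ⟨hr1, hr2, hr3⟩ := pvSqrt_bounds h
  rw [List.nodup_flatMap]
  constructor
  · intro i hi
    rw [PySem.List.mem_pyRange_one] at hi
    unfold pvG
    by_cases hd : i ∣ n
    · have hm : PySem.Int.mod n i = 0 := (PySem.Int.mod_eq_zero_iff_dvd n i).2 hd
      by_cases hsq : i * i ≠ n
      · have := pvCofactor_gt h hd (by omega) (by omega) hsq
        rw [PySem.Int.floordiv_eq_ediv_of_pos (by omega : (0:Int) < i)]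
        simp [hm, hsq]
        omega
      · simp [hm, hsq]
    · have hm : ¬ PySem.Int.mod n i = 0 := fun hc => hd ((PySem.Int.mod_eq_zero_iff_dvd n i).1 hc)
      simp [hm]
  · have hpw : (PySem.List.pyRange 1 (Int.sqrt n + 1) 1).Pairwise (· < ·) := by
      rw [PySem.List.pyRange_of_pos 1 (Int.sqrt n + 1) (by norm_num)]
      rw [List.pairwise_map]
      exact List.pairwise_lt_range.imp (by intro a b hab; omega)
    refine hpw.imp_of_mem ?_
    intro i j hi hj hij
    rw [PySem.List.mem_pyRange_one] at hi hj
    intro a hai haj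
    obtain ⟨hdi, hci⟩ := (pvMem_g (by omega) a).1 hai
    obtain ⟨hdj, hcj⟩ := (pvMem_g (by omega) a).1 haj
    obtain ⟨hici, hc1i, _, _⟩ := pvCofactor h hdi (by omega)
    obtain ⟨hicj, hc1j, _, _⟩ := pvCofactor h hdj (by omega)
    rcases hci with rfl | ⟨hsqi, rfl⟩
    · rcases hcj with he | ⟨hsqj, he⟩
      · omega
      · have := pvCofactor_gt h hdj (by omega) (by omega) hsqj
        omega
    · rcases hcj with he | ⟨hsqj, he⟩
      · have := pvCofactor_gt h hdi (by omega) (by omega) hsqi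
        omega
      · have hij2 : i * (n / i) = j * (n / i) := by linear_combination hici - hicj - j * he
        have : i = j := mul_right_cancel₀ (by omega) hij2
        omega

theorem pvNodup_pyRange (a b : Int) : (PySem.List.pyRange a b 1).Nodup := by
  rw [PySem.List.pyRange_of_pos a b (by norm_num)]
  exact (List.nodup_range).map (fun x y hxy => by omega)


-- ---- B-side lemmas ----

theorem pvToNat_mul_exp (x : Nat) (k : Int) : ((x : Int) * k).toNat = x * k.toNat := by
  by_cases hk : 0 ≤ k
  · have h1 : (x : Int) * k = ((x * k.toNat : Nat) : Int) := by
      push_cast [Int.toNat_of_nonneg hk]; ring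
    rw [h1, Int.toNat_natCast]
  · push_neg at hk
    have h1 : (x : Int) * k ≤ 0 :=
      mul_nonpos_of_nonneg_of_nonpos (by positivity) (by omega)
    rw [Int.toNat_of_nonpos h1, Int.toNat_of_nonpos (by omega)]
    omega

theorem pvSumRange (n : Nat) (f : Nat → Nat) :
    (Finset.range n).sum f = ((List.range n).map f).sum := by
  exact Eq.symm (Nat.add_zero (List.foldr (fun x1 x2 => x1 + x2) 0 (List.map f (List.range n))))

theorem pvGeomSum {p k : Int} (j : Nat) (hp : 2 ≤ p) (hprime : Nat.Prime p.toNat) :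
    ((PySem.List.pyRange 0 ((j : Int) + 1) 1).map (fun x => p ^ (x * k).toNat)).sum
      = ((ArithmeticFunction.sigma k.toNat (p.toNat ^ j) : Nat) : Int) := by
  have h0 : ((j : Int) + 1) = ((j + 1 : Nat) : Int) := by push_cast; ring
  rw [h0, PySem.List.pyRange_zero_natCast, List.map_map,
    ArithmeticFunction.sigma_apply_prime_pow hprime, pvSumRange]
  rw [Nat.cast_list_sum, List.map_map]
  congr 1
  apply List.map_congr_left
  intro x _
  simp only [Function.comp]
  rw [pvToNat_mul_exp]
  have hpcast : ((p.toNat : Nat) : Int) = p := Int.toNat_of_nonneg (by omega)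
  push_cast
  rw [hpcast]

theorem pvDivOutF_spec : ∀ (f : Nat) (m p e : Int), 1 ≤ m → 2 ≤ p → m.toNat ≤ f →
    ∃ j : Nat, (pvDivOutF f m p e).2 = e + (j : Int) ∧ m = p ^ j * (pvDivOutF f m p e).1 ∧
      ¬ p ∣ (pvDivOutF f m p e).1 ∧ 1 ≤ (pvDivOutF f m p e).1 := by
  intro f
  induction f with
  | zero => intro m p e h1 hp hf; omega
  | succ f ih =>
    intro m p e h1 hp hf
    by_cases hmod : PySem.Int.mod m p = 0
    · have hd : p ∣ m := (PySem.Int.mod_eq_zero_iff_dvd m p).1 hmod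
      obtain ⟨hic, hc1, hcn, -⟩ := pvCofactor h1 hd (by omega)
      have hlt : m / p < m := by
        have h3 : m * 2 ≤ m * p := mul_le_mul_of_nonneg_left (by omega) (by omega)
        nlinarith
      simp only [pvDivOutF, if_pos hmod]
      rw [PySem.Int.floordiv_eq_ediv_of_pos (by omega)]
      obtain ⟨j, hj1, hj2, hj3, hj4⟩ := ih (m / p) p (e + 1) hc1 hp (by omega)
      refine ⟨j + 1, by push_cast at hj1 ⊢; omega, ?_, hj3, hj4⟩
      calc m = p * (m / p) := hic.symm
        _ = p * (p ^ j * (pvDivOutF f (m / p) p (e + 1)).1) := by rw [← hj2]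
        _ = p ^ (j + 1) * (pvDivOutF f (m / p) p (e + 1)).1 := by ring
    · have hnd : ¬ p ∣ m := fun hc => hmod ((PySem.Int.mod_eq_zero_iff_dvd m p).2 hc)
      simp only [pvDivOutF, if_neg hmod]
      exact ⟨0, by simp, by simp, hnd, h1⟩

-- if no q with 2 ≤ q < p divides m and p divides m, then p is prime
theorem pvSmallest_prime {m p : Int} (h1 : 1 ≤ m) (hp : 2 ≤ p)
    (hinv : ∀ q : Int, 2 ≤ q → q < p → ¬ q ∣ m) (hpd : p ∣ m) : Nat.Prime p.toNat := by
  by_contra hnp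
  have hq := Nat.minFac_prime (show p.toNat ≠ 1 by omega)
  have hqd : p.toNat.minFac ∣ p.toNat := Nat.minFac_dvd _
  have hqlt : p.toNat.minFac < p.toNat :=
    lt_of_le_of_ne (Nat.le_of_dvd (by omega) hqd) (fun he => hnp (he ▸ hq))
  have hpcast : ((p.toNat : Nat) : Int) = p := Int.toNat_of_nonneg (by omega)
  have hqdInt : (p.toNat.minFac : Int) ∣ m := by
    refine dvd_trans ?_ hpd
    rw [← hpcast]
    exact_mod_cast hqd
  exact hinv (p.toNat.minFac : Int) (by exact_mod_cast hq.two_le)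
    (by rw [← hpcast]; exact_mod_cast hqlt) hqdInt

theorem pvLoop_eq (k : Int) : ∀ (f : Nat) (m p total : Int),
    1 ≤ m → 2 ≤ p → (∀ q : Int, 2 ≤ q → q < p → ¬ q ∣ m) → (m - p).toNat < f →
    pvSigmaLoopF k f m p total
      = total * ((ArithmeticFunction.sigma k.toNat m.toNat : Nat) : Int) := by
  intro f
  induction f with
  | zero => intro m p total h1 hp hinv hf; omega
  | succ f ih =>
    intro m p total h1 hp hinv hf
    by_cases hpp : p * p ≤ m
    · have hplt : p * 2 ≤ p * p := mul_le_mul_of_nonneg_left (by omega) (by omega)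
      by_cases hmod : PySem.Int.mod m p = 0
      · simp only [pvSigmaLoopF, if_pos hpp, if_pos hmod]
        have hpd : p ∣ m := (PySem.Int.mod_eq_zero_iff_dvd m p).1 hmod
        have hprime : Nat.Prime p.toNat := pvSmallest_prime h1 hp hinv hpd
        obtain ⟨j, hj1, hj2, hj3, hj4⟩ := pvDivOutF_spec m.toNat m p 0 h1 hp le_rfl
        set r := pvDivOutF m.toNat m p 0 with hrdef
        have hr1d : r.1 ∣ m := ⟨p ^ j, by rw [hj2]; ring⟩
        have hr1m : r.1 ≤ m := Int.le_of_dvd (by omega) hr1d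
        have hinv' : ∀ q : Int, 2 ≤ q → q < p + 1 → ¬ q ∣ r.1 := by
          intro q hq2 hqp1 hqd
          rcases lt_or_eq_of_le (show q ≤ p by omega) with hlt | rfl
          · exact hinv q hq2 hlt (hqd.trans hr1d)
          · exact hj3 hqd
        rw [ih r.1 (p + 1) _ hj4 (by omega) hinv' (by omega)]
        have hpcast : ((p.toNat : Nat) : Int) = p := Int.toNat_of_nonneg (by omega)
        have hr1cast : ((r.1.toNat : Nat) : Int) = r.1 := Int.toNat_of_nonneg (by omega)
        have hmN : m.toNat = p.toNat ^ j * r.1.toNat := by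
          have hcast : ((m.toNat : Nat) : Int) = ((p.toNat ^ j * r.1.toNat : Nat) : Int) := by
            rw [Int.toNat_of_nonneg (by omega : (0:Int) ≤ m)]
            push_cast
            rw [hpcast, hr1cast]
            exact hj2
          exact_mod_cast hcast
        have hndN : ¬ p.toNat ∣ r.1.toNat := by
          intro hc
          apply hj3
          rw [← hpcast, ← hr1cast]
          exact_mod_cast hc
        have hcop : Nat.Coprime (p.toNat ^ j) r.1.toNat :=
          Nat.Coprime.pow_left j (hprime.coprime_iff_not_dvd.2 hndN)
        have hmul : ArithmeticFunction.sigma k.toNat m.toNat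
            = ArithmeticFunction.sigma k.toNat (p.toNat ^ j)
              * ArithmeticFunction.sigma k.toNat r.1.toNat := by
          rw [hmN]
          exact ArithmeticFunction.isMultiplicative_sigma.map_mul_of_coprime hcop
        have hg : ((PySem.List.pyRange 0 (r.2 + 1) 1).map (fun x => p ^ (x * k).toNat)).sum
            = ((ArithmeticFunction.sigma k.toNat (p.toNat ^ j) : Nat) : Int) := by
          have hr2 : r.2 = (j : Int) := by omega
          rw [hr2]
          exact pvGeomSum j hp hprime
        rw [hg, hmul]
        push_cast
        ring
      · simp only [pvSigmaLoopF, if_pos hpp, if_neg hmod]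
        have hnd : ¬ p ∣ m := fun hc => hmod ((PySem.Int.mod_eq_zero_iff_dvd m p).2 hc)
        refine ih m (p + 1) total h1 (by omega) ?_ (by omega)
        intro q hq2 hqp1
        rcases lt_or_eq_of_le (show q ≤ p by omega) with hlt | rfl
        · exact hinv q hq2 hlt
        · exact hnd
    · simp only [pvSigmaLoopF, if_neg hpp]
      have hlt : m < p * p := by omega
      by_cases hm1 : 1 < m
      · rw [if_pos hm1]
        have hmcast : ((m.toNat : Nat) : Int) = m := Int.toNat_of_nonneg (by omega)
        have hprime : Nat.Prime m.toNat := by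
          by_contra hnp
          have hq := Nat.minFac_prime (show m.toNat ≠ 1 by omega)
          have hqd : m.toNat.minFac ∣ m.toNat := Nat.minFac_dvd _
          have hsq : m.toNat.minFac ^ 2 ≤ m.toNat := Nat.minFac_sq_le_self (by omega) hnp
          have hqdInt : (m.toNat.minFac : Int) ∣ m := by
            rw [← hmcast]; exact_mod_cast hqd
          have hqge : p ≤ (m.toNat.minFac : Int) := by
            by_contra hc
            push_neg at hc
            exact hinv _ (by exact_mod_cast hq.two_le) hc hqdInt
          have hsqInt : (m.toNat.minFac : Int) * (m.toNat.minFac : Int) ≤ m := by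
            rw [← hmcast]
            have h6 : m.toNat.minFac * m.toNat.minFac ≤ m.toNat := by
              nlinarith [hsq, sq_nonneg m.toNat.minFac]
            exact_mod_cast h6
          have hpple : p * p ≤ (m.toNat.minFac : Int) * (m.toNat.minFac : Int) :=
            mul_le_mul hqge hqge (by omega) (by omega)
          omega
        have hs : ArithmeticFunction.sigma k.toNat m.toNat = 1 + m.toNat ^ k.toNat := by
          rw [ArithmeticFunction.sigma_apply, hprime.divisors,
            Finset.sum_pair (show 1 ≠ m.toNat by omega)]
          simp
        rw [hs]
        push_cast
        rw [hmcast]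
      · rw [if_neg hm1]
        have hm : m = 1 := by omega
        subst hm
        simp [ArithmeticFunction.sigma_one]

theorem pvAlt_eq (n k : Int) (h : 1 ≤ n) :
    sigma_k_alt n k = ((ArithmeticFunction.sigma k.toNat n.toNat : Nat) : Int) := by
  unfold sigma_k_alt
  rw [if_neg (by omega),
    pvLoop_eq k (n.toNat + 1) n 2 1 h (by norm_num) (by intro q hq2 hq _; omega) (by omega),
    one_mul]

-- ---- bridge: the divisor-filter sum is σ_k ----

theorem pvFilterSum_eq_sigma {n : Int} (K : Nat) (h : 1 ≤ n) :
    (((PySem.List.pyRange 1 (n + 1) 1).filter (fun i => PySem.Int.mod n i == 0)).map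
      (fun d => d ^ K)).sum = ((ArithmeticFunction.sigma K n.toNat : Nat) : Int) := by
  have hncast : ((n.toNat : Nat) : Int) = n := Int.toNat_of_nonneg (by omega)
  have e1 : PySem.List.pyRange 1 (n + 1) 1
      = (List.range' 1 n.toNat).map (fun x : Nat => (x : Int)) := by
    rw [PySem.List.pyRange_of_pos 1 (n + 1) (by norm_num), if_pos (by omega),
      List.range'_eq_map_range, List.map_map]
    have harg : ((n + 1 - 1 + 1 - 1) / 1).toNat = n.toNat := by
      have h5 : n + 1 - 1 + 1 - 1 = n := by ring
      rw [h5, Int.ediv_one]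
    rw [harg]
    apply List.map_congr_left
    intro x _
    simp only [Function.comp]
    push_cast
    ring
  rw [e1, List.filter_map]
  have e2 : (List.range' 1 n.toNat).filter ((fun i => PySem.Int.mod n i == 0) ∘ (fun x : Nat => (x : Int)))
      = (List.range' 1 n.toNat).filter (fun d => decide (d ∣ n.toNat)) := by
    apply List.filter_congr
    intro x _
    simp only [Function.comp]
    have : (PySem.Int.mod n (x : Int) == 0) = decide ((x : Int) ∣ n) := by
      rcases Decidable.em ((x : Int) ∣ n) with hd | hd
      · simp [(PySem.Int.mod_eq_zero_iff_dvd n (x : Int)).2 hd, hd]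
      · have : ¬ PySem.Int.mod n (x : Int) = 0 :=
          fun hc => hd ((PySem.Int.mod_eq_zero_iff_dvd n (x : Int)).1 hc)
        simp [this, hd]
    rw [this]
    congr 1
    rw [← hncast]
    exact propext Int.natCast_dvd_natCast
  rw [e2, List.map_map]
  have e5 : List.map ((fun d : Int => d ^ K) ∘ (fun x : Nat => (x : Int)))
        ((List.range' 1 n.toNat).filter (fun d => decide (d ∣ n.toNat)))
      = List.map (fun x : Nat => (x : Int))
        (List.map (fun d : Nat => d ^ K)
          ((List.range' 1 n.toNat).filter (fun d => decide (d ∣ n.toNat)))) := by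
    rw [List.map_map]
    apply List.map_congr_left
    intro x _
    simp only [Function.comp]
    push_cast
    ring
  rw [e5, ← Nat.cast_list_sum]
  congr 1

-- ===== VERDICT (by name: the statement is the Claim_ definition above) =====
theorem sigma_k_spec : Claim_equal_sigma_k := by
  intro n k _ _
  unfold Spec_sigma_k
  by_cases hn : n ≤ 0
  · unfold sigma_k sigma_k_alt
    rw [if_pos hn, if_pos hn]
  · have h1 : (1:Int) ≤ n := by omega
    have hA : sigma_k n k
        = (((PySem.List.pyRange 1 (n + 1) 1).filter (fun i => PySem.Int.mod n i == 0)).map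
            (fun d => d ^ k.toNat)).sum := by
      unfold sigma_k
      rw [if_neg hn]
      have hfold : (PySem.List.pyRange 1 (Int.sqrt n + 1) 1).foldl
          (fun acc i =>
            if PySem.Int.mod n i == 0 then
              let acc1 := acc ++ [i]
              if i * i ≠ n then acc1 ++ [PySem.Int.floordiv n i] else acc1
            else acc) [] =
          (PySem.List.pyRange 1 (Int.sqrt n + 1) 1).flatMap (pvG n) := by
        rw [PySem.List.foldl_congr_mem _ _ (fun acc i => acc ++ pvG n i) _ ?_]
        · exact PySem.List.foldl_append_eq_flatMap (pvG n) _ []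
        · intro acc i _
          unfold pvG
          by_cases hm : PySem.Int.mod n i == 0 <;> by_cases hsq : i * i ≠ n <;> simp [hm, hsq]
      rw [hfold]
      have hperm : ((PySem.List.pyRange 1 (Int.sqrt n + 1) 1).flatMap (pvG n)).Perm
          ((PySem.List.pyRange 1 (n + 1) 1).filter (fun i => PySem.Int.mod n i == 0)) := by
        rw [List.perm_ext_iff_of_nodup (pvNodup_flatMap_g h1)
          ((pvNodup_pyRange 1 (n + 1)).filter _)]
        intro a
        rw [pvMem_flatMap_g h1 a, List.mem_filter, PySem.List.mem_pyRange_one]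
        constructor
        · rintro ⟨ha1, ha2, ha3⟩
          exact ⟨⟨ha1, by omega⟩, by simpa [PySem.Int.mod_eq_zero_iff_dvd] using ha3⟩
        · rintro ⟨⟨ha1, ha2⟩, ha3⟩
          exact ⟨ha1, by omega, by simpa [PySem.Int.mod_eq_zero_iff_dvd] using ha3⟩
      exact ((hperm.map _).sum_eq)
    rw [hA, pvFilterSum_eq_sigma k.toNat h1, pvAlt_eq n k h1]
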